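-- pv_equiv track=rewrite | github.com/afanty2021/Memento-Skills | infra/compact/prompts.py | analyze_section_sizes
-- ===== SOURCE A (Python) =====
-- def analyze_section_sizes(content: str) -> dict[str, int]:
--     """按段统计 tokens。"""
--     sections: dict[str, int] = {}
--     current_header = ""
--     current_text: list[str] = []
--
--     for line in content.split("\n"):
--         if line.startswith("# "):
--             if current_header:
--                 sections[current_header] = estimate_tokens_fast("\n".join(current_text))
--             current_header = line.strip()
--             current_text = []
--         else:
--             current_text.append(line)
--
--     if current_header:
--         sections[current_header] = estimate_tokens_fast("\n".join(current_text))
--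
--     return sections
--
-- def estimate_tokens_fast(text: str) -> int:
--     """O(1) 粗略 token 估算。"""
--     if not text:
--         return 0
--     return len(text) // 3 + 1
-- ===== SOURCE B (Python) =====
-- def estimate_tokens_fast(text: str) -> int:
--     """O(1) rough token estimate."""
--     if not text:
--         return 0
--     return len(text) // 3 + 1
--
--
-- def analyze_section_sizes(content: str) -> dict[str, int]:
--     """Two-phase: group body lines under their header first, estimate afterwards."""
--     bodies: dict[str, list[str]] = {}
--     header = None
--     for line in content.split("\n"):
--         if line.startswith("# "):
--             header = line.strip()
--             bodies[header] = []
--         elif header is not None: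
--             bodies[header].append(line)
--     return {h: estimate_tokens_fast("\n".join(body)) for h, body in bodies.items()}
-- ===== Notes on version B (the rewrite author's own statement) =====
-- stated objective: alternative
-- what changed: B splits the work into two differently-shaped passes: a grouping pass that builds an ordered dict from each header to the raw list of its body lines (resetting on duplicate headers, ignoring pre-header lines), and a final dict comprehension that estimates tokens per stored body; A instead runs a flush-at-boundary state machine that estimates inline each time a section closes.
import Mathlib
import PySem

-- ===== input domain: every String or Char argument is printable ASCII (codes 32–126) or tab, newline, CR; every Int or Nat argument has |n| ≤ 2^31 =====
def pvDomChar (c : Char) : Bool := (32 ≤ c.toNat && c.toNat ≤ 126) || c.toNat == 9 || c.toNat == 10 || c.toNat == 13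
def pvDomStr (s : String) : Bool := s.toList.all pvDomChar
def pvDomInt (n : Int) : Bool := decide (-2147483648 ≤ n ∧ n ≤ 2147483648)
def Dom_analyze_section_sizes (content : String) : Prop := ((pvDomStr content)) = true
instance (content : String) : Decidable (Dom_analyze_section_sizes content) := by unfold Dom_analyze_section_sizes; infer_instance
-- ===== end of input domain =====

-- B regroups the work: one pass builds header ↦ raw body lines, a second pass estimates tokens; same values as A (alternative decomposition, no speed claim).

-- helper shared by both sources: estimate_tokens_fast
def pvEstimateTokens (text : String) : Int :=
  if PySem.Str.len text = 0 then 0 else PySem.Int.floordiv (PySem.Str.len text) 3 + 1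

-- ===== PORT A =====
-- loop body of A: state = (sections, current_header, current_text)
def pvStepA (st : PySem.Dict String Int × String × List String) (line : String) :
    PySem.Dict String Int × String × List String :=
  if PySem.Str.startswith line "# " then
    let s := if st.2.1 ≠ "" then st.1.insert st.2.1 (pvEstimateTokens (PySem.Str.join "\n" st.2.2)) else st.1
    (s, PySem.Str.strip line, [])
  else
    (st.1, st.2.1, st.2.2 ++ [line])

-- final flush after the loop
def pvFinishA (st : PySem.Dict String Int × String × List String) : PySem.Dict String Int :=
  if st.2.1 ≠ "" then st.1.insert st.2.1 (pvEstimateTokens (PySem.Str.join "\n" st.2.2)) else st.1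

def analyze_section_sizes (content : String) : List (String × Int) :=
  (pvFinishA (((PySem.Str.split? content "\n").getD []).foldl pvStepA
    (PySem.Dict.empty, "", []))).items

-- ===== PORT B =====
-- grouping pass of B: state = (bodies, current header or None)
def pvStepB (st : PySem.Dict String (List String) × Option String) (line : String) :
    PySem.Dict String (List String) × Option String :=
  if PySem.Str.startswith line "# " then
    let h := PySem.Str.strip line
    (st.1.insert h [], some h)
  else
    match st.2 with
    | some h => (st.1.modify h [] (· ++ [line]), st.2)   -- bodies[header].append(line)
    | none => st

def analyze_section_sizes_alt (content : String) : List (String × Int) :=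
  ((((PySem.Str.split? content "\n").getD []).foldl pvStepB (PySem.Dict.empty, none)).1.items).map
    (fun p => (p.1, pvEstimateTokens (PySem.Str.join "\n" p.2)))

-- ===== PRECONDITION & SPEC =====
def Spec_analyze_section_sizes (content : String) (out : List (String × Int)) : Prop := out = analyze_section_sizes_alt content
instance (content : String) (out : List (String × Int)) : Decidable (Spec_analyze_section_sizes content out) := by unfold Spec_analyze_section_sizes; infer_instance

-- ===== CLAIM (what is proved, stated in full; the proofs are below) =====
def Claim_equal_analyze_section_sizes : Prop := ∀ (content : String), Dom_analyze_section_sizes content → Spec_analyze_section_sizes content (analyze_section_sizes content)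

-- ===== LEMMAS AND PROOFS =====

-- B's bodies dict mapped through the estimator, value-wise
def pvMapB (d : PySem.Dict String (List String)) : PySem.Dict String Int :=
  PySem.Dict.mk (d.items.map (fun p => (p.1, pvEstimateTokens (PySem.Str.join "\n" p.2))))

lemma pvItems_pvMapB (d : PySem.Dict String (List String)) :
    (pvMapB d).items = d.items.map (fun p => (p.1, pvEstimateTokens (PySem.Str.join "\n" p.2))) := rfl

lemma pvMapB_empty : pvMapB PySem.Dict.empty = PySem.Dict.empty := rfl

lemma pvContains_pvMapB (d : PySem.Dict String (List String)) (k : String) :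
    (pvMapB d).contains k = d.contains k := by
  simp only [PySem.Dict.contains, pvItems_pvMapB, List.any_map]
  rfl

lemma pvMapB_insert (d : PySem.Dict String (List String)) (k : String) (v : List String) :
    pvMapB (d.insert k v) = (pvMapB d).insert k (pvEstimateTokens (PySem.Str.join "\n" v)) := by
  apply PySem.Dict.ext
  rw [pvItems_pvMapB]
  by_cases hc : d.contains k = true
  · rw [PySem.Dict.items_insert_of_contains _ _ hc,
      PySem.Dict.items_insert_of_contains _ _ (by rw [pvContains_pvMapB]; exact hc),
      pvItems_pvMapB, List.map_map, List.map_map]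
    refine List.map_congr_left ?_
    intro p _
    by_cases hk : p.1 = k <;> simp [hk]
  · have hc' : d.contains k = false := by simpa using hc
    rw [PySem.Dict.items_insert_of_not_contains _ _ hc',
      PySem.Dict.items_insert_of_not_contains _ _ (by rw [pvContains_pvMapB]; exact hc'),
      pvItems_pvMapB, List.map_append]
    rfl

lemma pvStrip_ne_empty {line : String} (h : PySem.Str.startswith line "# " = true) :
    PySem.Str.strip line ≠ "" := by
  intro he
  obtain ⟨t, ht⟩ := (PySem.Chars.startswith_iff _ _).mp h
  have ht' : line.toList = '#' :: ' ' :: t := by rw [← ht]; rfl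
  have h1 : PySem.Chars.strip line.toList = [] := by
    have := congrArg String.toList he
    rwa [PySem.Str.toList_strip] at this
  have hl : PySem.Chars.lstrip line.toList = '#' :: ' ' :: t := by
    rw [PySem.Chars.lstrip, ht', List.dropWhile_cons_of_neg (by decide)]
  rw [PySem.Chars.strip, hl, PySem.Chars.rstrip] at h1
  have h2 : List.dropWhile PySem.Chars.isspace ('#' :: ' ' :: t).reverse = [] := by
    simpa using congrArg List.reverse h1
  have h3 := (List.dropWhile_eq_nil_iff).mp h2 '#' (by simp)
  exact absurd h3 (by decide)

-- branch-reduction lemmas for the two loop bodies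
lemma pvStepA_header {line : String} (hb : PySem.Str.startswith line "# " = true)
    (st : PySem.Dict String Int × String × List String) :
    pvStepA st line =
      (if st.2.1 ≠ "" then st.1.insert st.2.1 (pvEstimateTokens (PySem.Str.join "\n" st.2.2))
        else st.1, PySem.Str.strip line, []) := by
  have hc : PySem.Chars.startswith line.toList ['#', ' '] = true := hb
  simp [pvStepA, hc]

lemma pvStepA_body {line : String} (hb : ¬ PySem.Str.startswith line "# " = true)
    (st : PySem.Dict String Int × String × List String) :
    pvStepA st line = (st.1, st.2.1, st.2.2 ++ [line]) := by
  have hc : PySem.Chars.startswith line.toList ['#', ' '] ≠ true := hb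
  simp [pvStepA, hc]

lemma pvStepB_header {line : String} (hb : PySem.Str.startswith line "# " = true)
    (st : PySem.Dict String (List String) × Option String) :
    pvStepB st line = (st.1.insert (PySem.Str.strip line) [], some (PySem.Str.strip line)) := by
  have hc : PySem.Chars.startswith line.toList ['#', ' '] = true := hb
  simp [pvStepB, hc]

lemma pvStepB_body {line : String} (hb : ¬ PySem.Str.startswith line "# " = true)
    (st : PySem.Dict String (List String) × Option String) :
    pvStepB st line =
      (match st.2 with
        | some h => (st.1.modify h [] (· ++ [line]), st.2)
        | none => st) := by
  have hc : PySem.Chars.startswith line.toList ['#', ' '] ≠ true := hb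
  simp [pvStepB, hc]

-- the simulation relation between A's loop state and B's loop state
def pvRel (a : PySem.Dict String Int × String × List String)
    (b : PySem.Dict String (List String) × Option String) : Prop :=
  (a.2.1 = "" ∧ b.2 = none ∧ a.1 = PySem.Dict.empty ∧ b.1 = PySem.Dict.empty) ∨
  (a.2.1 ≠ "" ∧ b.2 = some a.2.1 ∧ b.1.get? a.2.1 = some a.2.2 ∧
    pvMapB b.1 = a.1.insert a.2.1 (pvEstimateTokens (PySem.Str.join "\n" a.2.2)))

lemma pvStep_rel {a : PySem.Dict String Int × String × List String}
    {b : PySem.Dict String (List String) × Option String} (line : String)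
    (hr : pvRel a b) : pvRel (pvStepA a line) (pvStepB b line) := by
  obtain ⟨s, hd, tx⟩ := a
  obtain ⟨t, ho⟩ := b
  by_cases hb : PySem.Str.startswith line "# " = true
  · have hne := pvStrip_ne_empty hb
    rw [pvStepA_header hb, pvStepB_header hb]
    rcases hr with ⟨h1, h2, h3, h4⟩ | ⟨h1, h2, h3, h4⟩
    · simp only at h1 h2 h3 h4
      subst h1 h3 h4
      right
      refine ⟨hne, rfl, PySem.Dict.get?_insert_self _ _ _, ?_⟩
      rw [pvMapB_insert, pvMapB_empty]
      simp
    · simp only at h1 h2 h3 h4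
      right
      refine ⟨hne, rfl, PySem.Dict.get?_insert_self _ _ _, ?_⟩
      rw [pvMapB_insert, h4]
      simp [h1]
  · rw [pvStepA_body hb, pvStepB_body hb]
    rcases hr with ⟨h1, h2, h3, h4⟩ | ⟨h1, h2, h3, h4⟩
    · simp only at h1 h2 h3 h4
      subst h1 h2 h3 h4
      left
      exact ⟨rfl, rfl, rfl, rfl⟩
    · simp only at h1 h2 h3 h4
      subst h2
      have hmod : (t.modify hd [] (· ++ [line])) = t.insert hd (tx ++ [line]) := by
        simp [PySem.Dict.modify, PySem.Dict.getD, h3]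
      right
      refine ⟨h1, rfl, ?_, ?_⟩
      · simp [hmod, PySem.Dict.get?_insert_self]
      · simp only [hmod]
        rw [pvMapB_insert, h4, PySem.Dict.insert_insert_self]

lemma pvRel_foldl (lines : List String) :
    ∀ (a : PySem.Dict String Int × String × List String)
      (b : PySem.Dict String (List String) × Option String),
      pvRel a b → pvRel (lines.foldl pvStepA a) (lines.foldl pvStepB b) := by
  induction lines with
  | nil => intro a b h; exact h
  | cons l ls ih => intro a b h; exact ih _ _ (pvStep_rel l h)

-- ===== VERDICT (by name: the statement is the Claim_ definition above) =====
theorem analyze_section_sizes_spec : Claim_equal_analyze_section_sizes := by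
  intro content _
  unfold Spec_analyze_section_sizes analyze_section_sizes analyze_section_sizes_alt
  have hr := pvRel_foldl ((PySem.Str.split? content "\n").getD [])
    (PySem.Dict.empty, "", []) (PySem.Dict.empty, none) (Or.inl ⟨rfl, rfl, rfl, rfl⟩)
  set fa := ((PySem.Str.split? content "\n").getD []).foldl pvStepA (PySem.Dict.empty, "", []) with hfa
  set fb := ((PySem.Str.split? content "\n").getD []).foldl pvStepB (PySem.Dict.empty, none) with hfb
  have key : pvFinishA fa = pvMapB fb.1 := by
    rcases hr with ⟨h1, _, h3, h4⟩ | ⟨h1, _, _, h4⟩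
    · rw [pvFinishA, if_neg (by simp [h1]), h3, h4]; rfl
    · rw [pvFinishA, if_pos h1, h4]
  rw [key]
  rfl
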